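-- pv_equiv track=rewrite | github.com/Ianokouji/CCC-151-STORE-RENTAL-MANAGEMENT-SYSTEM | CCC 151 STORE SYSTEM/controller.py | validateTenantID
-- ===== SOURCE A (Python) =====
-- def validateTenantID(tenant_id):
--     # Check if tenant ID is in the format XXXX-XXXX
--     if len(tenant_id) != 9:
--         return False
--     parts = tenant_id.split('-')
--     if len(parts) != 2 or len(parts[0]) != 4 or len(parts[1]) != 4:
--         return False
--     if not all(part.isdigit() for part in parts):
--         return False
--     return True
-- ===== SOURCE B (Python) =====
-- def validateTenantID(tenant_id):
--     # Same validation as a single positional pass: no split, no part lists.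
--     if len(tenant_id) != 9:
--         return False
--     for i, c in enumerate(tenant_id):
--         if i == 4:
--             if c != '-':
--                 return False
--         elif not c.isdigit():
--             return False
--     return True
-- ===== Notes on version B (the rewrite author's own statement) =====
-- stated objective: simpler
-- what changed: Replaces the split-on-dash plus part-count/part-length checks with one positional scan over enumerate(tenant_id) that demands a dash at index 4 and a digit everywhere else.
import Mathlib
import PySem

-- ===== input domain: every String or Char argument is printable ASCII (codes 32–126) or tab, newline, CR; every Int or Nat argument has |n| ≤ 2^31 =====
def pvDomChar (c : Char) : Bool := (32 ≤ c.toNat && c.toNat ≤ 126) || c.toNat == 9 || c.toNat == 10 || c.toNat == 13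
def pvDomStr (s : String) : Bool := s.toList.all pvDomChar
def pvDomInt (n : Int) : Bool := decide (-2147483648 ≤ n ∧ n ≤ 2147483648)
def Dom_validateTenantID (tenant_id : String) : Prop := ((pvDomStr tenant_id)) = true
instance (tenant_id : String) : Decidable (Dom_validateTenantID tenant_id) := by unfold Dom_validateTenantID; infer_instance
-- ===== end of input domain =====

-- B validates the XXXX-XXXX id by one positional scan (dash at index 4, digits elsewhere) instead of splitting on the dash and measuring the parts; same result, simpler.


-- ===== PORT A =====
-- parts[0]/parts[1] are only reached behind the short-circuited 'len(parts) != 2' test, so getD is exact here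
def validateTenantID (tenant_id : String) : Bool :=
  if PySem.Chars.len tenant_id.toList ≠ 9 then false
  else
    let parts := PySem.Chars.splitOn tenant_id.toList ['-']
    if parts.length ≠ 2 ∨ PySem.Chars.len (parts.getD 0 []) ≠ 4 ∨ PySem.Chars.len (parts.getD 1 []) ≠ 4 then false
    else if ¬ (parts.all PySem.Chars.strIsdigit) then false
    else true

-- ===== PORT B =====
-- the for-loop with early returns, as an all-quantified pass over enumerate
def validateTenantID_alt (tenant_id : String) : Bool :=
  if PySem.Chars.len tenant_id.toList ≠ 9 then false
  else (PySem.List.enumerate tenant_id.toList 0).all fun ic =>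
        if ic.1 = 4 then ic.2 == '-' else PySem.Chars.isdigit ic.2

-- ===== PRECONDITION & SPEC =====
def Spec_validateTenantID (tenant_id : String) (out : Bool) : Prop := out = validateTenantID_alt tenant_id
instance (tenant_id : String) (out : Bool) : Decidable (Spec_validateTenantID tenant_id out) := by unfold Spec_validateTenantID; infer_instance

-- ===== CLAIM (what is proved, stated in full; the proofs are below) =====
def Claim_equal_validateTenantID : Prop := ∀ (tenant_id : String), Dom_validateTenantID tenant_id → Spec_validateTenantID tenant_id (validateTenantID tenant_id)

-- ===== LEMMAS AND PROOFS =====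

-- structural form of splitting a char list on '-'
def sdash : List Char → List (List Char)
  | [] => [[]]
  | c :: rest => if c = '-' then [] :: sdash rest else (sdash rest).modifyHead (c :: ·)

-- re-joining the parts with '-'
def joinDash : List (List Char) → List Char
  | [] => []
  | [p] => p
  | p :: q :: ps => p ++ '-' :: joinDash (q :: ps)

lemma sdash_ne_nil (l : List Char) : sdash l ≠ [] := by
  induction l with
  | nil => simp [sdash]
  | cons c rest ih =>
    simp only [sdash]
    split_ifs
    · simp
    · cases h : sdash rest with
      | nil => exact absurd h ih
      | cons p ps => simp [List.modifyHead]

set_option maxRecDepth 4096 in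
lemma go_eq_sdash : ∀ (l : List Char) (fuel : Nat) (cur : List Char) (acc : List (List Char)),
    l.length < fuel →
    PySem.Chars.splitOn.go ['-'] fuel l cur acc
      = acc.reverse ++ (sdash l).modifyHead (cur.reverse ++ ·) := by
  intro l
  induction l with
  | nil =>
    intro fuel cur acc hf
    cases fuel with
    | zero => omega
    | succ fuel => simp [PySem.Chars.splitOn.go, sdash]
  | cons c rest ih =>
    intro fuel cur acc hf
    cases fuel with
    | zero => omega
    | succ fuel =>
      have hr : rest.length < fuel := by simp at hf; omega
      simp only [PySem.Chars.splitOn.go, List.isPrefixOf, Bool.and_true]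
      by_cases hc : c = '-'
      · subst hc
        simp only [beq_self_eq_true, if_pos, List.length_cons, List.length_nil,
          List.drop_succ_cons, List.drop_zero]
        rw [ih fuel [] (List.reverse cur :: acc) hr]
        rw [show sdash ('-'::rest) = [] :: sdash rest from by rw [sdash]; simp]
        cases h : sdash rest with
        | nil => exact absurd h (sdash_ne_nil rest)
        | cons p ps => simp [List.modifyHead]
      · have hcb : (('-' : Char) == c) = false :=
          beq_eq_false_iff_ne.mpr (fun hh => hc hh.symm)
        simp only [hcb, Bool.false_eq_true, if_neg]
        rw [ih fuel (c :: cur) acc hr]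
        rw [show sdash (c::rest) = (sdash rest).modifyHead (c :: ·) from by rw [sdash]; simp [hc]]
        cases h : sdash rest with
        | nil => exact absurd h (sdash_ne_nil rest)
        | cons p ps => simp [h, List.modifyHead]

lemma splitOn_eq_sdash (l : List Char) : PySem.Chars.splitOn l ['-'] = sdash l := by
  rw [PySem.Chars.splitOn, go_eq_sdash l (l.length + 1) [] [] (by omega)]
  cases h : sdash l with
  | nil => exact absurd h (sdash_ne_nil l)
  | cons p ps => simp [List.modifyHead]

lemma joinDash_sdash (l : List Char) : joinDash (sdash l) = l := by
  induction l with
  | nil => simp [sdash, joinDash]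
  | cons c rest ih =>
    by_cases hc : c = '-'
    · subst hc
      cases h : sdash rest with
      | nil => exact absurd h (sdash_ne_nil rest)
      | cons q qs => simp_all [sdash, joinDash]
    · cases h : sdash rest with
      | nil => exact absurd h (sdash_ne_nil rest)
      | cons q qs =>
        cases qs with
        | nil => simp_all [sdash, joinDash, List.modifyHead]
        | cons q' qs' => simp_all [sdash, joinDash, List.modifyHead]

lemma isdigit_ne_dash (c : Char) (h : PySem.Chars.isdigit c = true) : c ≠ '-' := by
  intro hc; subst hc; simp [PySem.Chars.isdigit] at h

lemma sdash_no_dash (p : List Char) (h : '-' ∉ p) : sdash p = [p] := by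
  induction p with
  | nil => simp [sdash]
  | cons c rest ih =>
    simp only [List.mem_cons, not_or] at h
    simp [sdash, Ne.symm h.1, h.1, ih h.2, List.modifyHead]

lemma sdash_append (p q : List Char) (h : '-' ∉ p) :
    sdash (p ++ '-' :: q) = p :: sdash q := by
  induction p with
  | nil => simp [sdash]
  | cons c rest ih =>
    simp only [List.mem_cons, not_or] at h
    have hc : c ≠ '-' := fun hh => h.1 hh.symm
    simp [sdash, hc, ih h.2, List.modifyHead]

-- the shared characterisation: a 4-digit block, a dash, a 4-digit block
def GoodShape (l : List Char) : Prop :=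
  ∃ p q, l = p ++ '-' :: q ∧ p.length = 4 ∧ q.length = 4 ∧
    PySem.Chars.strIsdigit p = true ∧ PySem.Chars.strIsdigit q = true

lemma A_iff (s : String) : validateTenantID s = true ↔ GoodShape s.toList := by
  constructor
  · intro hA
    simp only [validateTenantID, splitOn_eq_sdash] at hA
    split_ifs at hA with h1 h2 h3
    push_neg at h2
    obtain ⟨hlen2, hlp, hlq⟩ := h2
    simp only [not_not] at h3
    rcases hp : sdash s.toList with _ | ⟨p, _ | ⟨q, _ | ⟨r, ps⟩⟩⟩
    · exact absurd hp (sdash_ne_nil _)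
    · rw [hp] at hlen2; simp at hlen2
    · refine ⟨p, q, ?_, ?_, ?_, ?_, ?_⟩
      · have := joinDash_sdash s.toList
        rw [hp] at this
        simpa [joinDash] using this.symm
      · have := hlp; rw [hp] at this; simp [PySem.Chars.len_eq] at this; exact_mod_cast this
      · have := hlq; rw [hp] at this; simp [PySem.Chars.len_eq] at this; exact_mod_cast this
      · rw [hp] at h3
        simp only [List.all_cons, List.all_nil, Bool.and_true, Bool.and_eq_true] at h3
        exact h3.1
      · rw [hp] at h3
        simp only [List.all_cons, List.all_nil, Bool.and_true, Bool.and_eq_true] at h3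
        exact h3.2
    · rw [hp] at hlen2; simp at hlen2
  · rintro ⟨p, q, hl, hp4, hq4, hpd, hqd⟩
    have hnp : '-' ∉ p := fun hm => isdigit_ne_dash _
      (List.all_eq_true.mp ((Bool.and_eq_true _ _).mp hpd).2 _ hm) rfl
    have hnq : '-' ∉ q := fun hm => isdigit_ne_dash _
      (List.all_eq_true.mp ((Bool.and_eq_true _ _).mp hqd).2 _ hm) rfl
    have hlen : s.toList.length = 9 := by rw [hl]; simp [hp4, hq4]
    simp only [validateTenantID, splitOn_eq_sdash, hl, sdash_append p q hnp,
      sdash_no_dash q hnq]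
    simp [PySem.Chars.len_eq, hp4, hq4, hpd, hqd, hlen]

lemma B_iff (s : String) : validateTenantID_alt s = true ↔ GoodShape s.toList := by
  constructor
  · intro hB
    simp only [validateTenantID_alt] at hB
    split_ifs at hB with h1
    have hlen : s.toList.length = 9 := by
      by_contra h; exact h1 (by simp [PySem.Chars.len_eq]; exact_mod_cast h)
    rcases hl : s.toList with _|⟨a,_|⟨b,_|⟨c,_|⟨d,_|⟨e,_|⟨f,_|⟨g,_|⟨h',_|⟨i,_|⟨j,rest⟩⟩⟩⟩⟩⟩⟩⟩⟩⟩ <;>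
      rw [hl] at hlen <;> simp at hlen
    rw [hl] at hB
    simp [PySem.List.enumerate] at hB
    obtain ⟨ha, hb, hc, hd, he, hf, hg, hh, hi⟩ := hB
    exact ⟨[a,b,c,d], [f,g,h',i], by simp [he], rfl, rfl,
      by simp [PySem.Chars.strIsdigit, ha, hb, hc, hd],
      by simp [PySem.Chars.strIsdigit, hf, hg, hh, hi]⟩
  · rintro ⟨p, q, hl, hp4, hq4, hpd, hqd⟩
    rcases p with _|⟨a,_|⟨b,_|⟨c,_|⟨d,_|⟨x,p'⟩⟩⟩⟩⟩ <;> simp at hp4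
    rcases q with _|⟨f,_|⟨g,_|⟨h',_|⟨i,_|⟨y,q'⟩⟩⟩⟩⟩ <;> simp at hq4
    simp only [PySem.Chars.strIsdigit, List.all_cons, List.all_nil] at hpd hqd
    simp only [validateTenantID_alt, hl]
    simp [PySem.List.enumerate, PySem.Chars.len] at hpd hqd ⊢
    exact ⟨hpd.1, hpd.2.1, hpd.2.2.1, hpd.2.2.2, hqd.1, hqd.2.1, hqd.2.2.1, hqd.2.2.2⟩

-- ===== VERDICT (by name: the statement is the Claim_ definition above) =====
theorem validateTenantID_spec : Claim_equal_validateTenantID := by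
  intro s _
  unfold Spec_validateTenantID
  have hA := A_iff s
  have hB := B_iff s
  cases hA' : validateTenantID s <;> cases hB' : validateTenantID_alt s <;> simp_all
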